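-- pv_equiv track=rewrite | github.com/reudekx/algorithm | 문제풀이/삼성/고대_문명_유적_탐사.py | gain_once
-- ===== SOURCE A (Python) =====
-- DIRS = [
--     (-1, 0), (1, 0), (0, -1), (0, 1)
-- ]
--
-- def is_in_bound(y, x):
--     return y >= 0 and y < 5 and x >= 0 and x < 5
--
-- def count_relic(y, x, relics, visited):
--     visited[y][x] = True
--     cnt = 1
--     for dy, dx in DIRS:
--         ny, nx = y + dy, x + dx
--         if not is_in_bound(ny, nx) or visited[ny][nx] or relics[ny][nx] != relics[y][x]:
--             continue
--         cnt += count_relic(ny, nx, relics, visited)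
--     return cnt
--
-- def remove_relic(y, x, kind, relics):
--     relics[y][x] = 0
--     for dy, dx in DIRS:
--         ny, nx = y + dy, x + dx
--         if not is_in_bound(ny, nx) or relics[ny][nx] != kind:
--             continue
--         remove_relic(ny, nx, kind, relics)
--
-- def gain_once(relics):
--     visited = [[False for _ in range(5)] for _ in range(5)]
--     cnt_sum = 0
--     for y in range(5):
--         for x in range(5):
--             if visited[y][x] or relics[y][x] == 0:
--                 continue
--             cnt = count_relic(y, x, relics, visited)
--             if cnt >= 3:
--                 cnt_sum += cnt
--                 remove_relic(y, x, relics[y][x], relics)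
--
--     return cnt_sum
-- ===== SOURCE B (Python) =====
-- def gain_once(relics):
--     def comp(sy, sx):
--         v = relics[sy][sx]
--         cells = {(sy, sx)}
--         for _ in range(25):
--             cells = cells | {(ny, nx)
--                              for (y, x) in cells
--                              for (ny, nx) in ((y - 1, x), (y + 1, x), (y, x - 1), (y, x + 1))
--                              if 0 <= ny < 5 and 0 <= nx < 5 and relics[ny][nx] == v}
--         return cells
--     total = 0
--     big = []
--     for y in range(5):
--         for x in range(5):
--             if relics[y][x] != 0 and len(comp(y, x)) >= 3:
--                 total += 1
--                 big.append((y, x))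
--     for (y, x) in big:
--         relics[y][x] = 0
--     return total
-- ===== Notes on version B (the rewrite author's own statement) =====
-- stated objective: alternative
-- what changed: Replaces the recursive count-DFS with shared visited matrix plus a second recursive removal pass by a per-cell fixed-point set saturation that computes each cell's equal-value component, counts the cells lying in components of size >= 3 (which equals the sum of those components' sizes), and zeroes exactly those cells in one final pass.
import Mathlib
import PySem

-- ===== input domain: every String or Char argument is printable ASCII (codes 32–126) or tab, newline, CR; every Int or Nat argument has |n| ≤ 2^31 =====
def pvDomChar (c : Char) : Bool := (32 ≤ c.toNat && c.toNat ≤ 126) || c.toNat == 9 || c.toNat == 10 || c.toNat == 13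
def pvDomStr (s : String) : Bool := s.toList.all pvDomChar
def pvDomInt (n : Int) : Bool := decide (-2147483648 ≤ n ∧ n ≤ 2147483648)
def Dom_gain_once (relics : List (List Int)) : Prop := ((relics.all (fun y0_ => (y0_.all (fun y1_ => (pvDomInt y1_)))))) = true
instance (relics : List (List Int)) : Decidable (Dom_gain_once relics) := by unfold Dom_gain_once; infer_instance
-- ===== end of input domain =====

-- B replaces A's recursive DFS (shared visited matrix + second removal recursion) by per-cell
-- fixed-point set saturation, counting the cells that lie in components of size ≥ 3.
-- Both Pythons mutate `relics` identically (zero the big groups); the ports and the proof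
-- are about the RETURN value only.

-- ===== PORT A =====
def pvDIRS : List (Int × Int) := [(-1, 0), (1, 0), (0, -1), (0, 1)]

def is_in_bound (y x : Int) : Bool :=
  decide (y ≥ 0) && decide (y < 5) && decide (x ≥ 0) && decide (x < 5)

-- m[y][x] read; every call site is guarded so that 0 ≤ y,x < 5 and (with Pre_) the access is in range,
-- hence the `.getD` default is never produced.
def cellG {α : Type} (d : α) (m : List (List α)) (y x : Int) : α :=
  ((PySem.List.pyGet? m y).bind (fun r => PySem.List.pyGet? r x)).getD d

def cellI (m : List (List Int)) (y x : Int) : Int := cellG 0 m y x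
def cellB (m : List (List Bool)) (y x : Int) : Bool := cellG false m y x

-- m[y][x] = v; every write site is guarded in-bounds (0 ≤ y,x < 5), where pySetD/pyGetD are exact.
def setCell {α : Type} (m : List (List α)) (y x : Int) (v : α) : List (List α) :=
  PySem.List.pySetD m y (PySem.List.pySetD (PySem.List.pyGetD m y []) x v)

-- recursion depth of the Python count_relic is bounded by the number of unvisited cells (≤ 25),
-- so fuel 25 is never exhausted; the fuel-0 branch is unreachable under Pre_.
def count_relic : Nat → Int → Int → List (List Int) → List (List Bool) → Int × List (List Bool)
  | 0, y, x, _, vis => (1, setCell vis y x true)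
  | f+1, y, x, relics, vis =>
    pvDIRS.foldl
      (fun acc d =>
        let ny := y + d.1
        let nx := x + d.2
        if !(is_in_bound ny nx) || cellB acc.2 ny nx || (cellI relics ny nx != cellI relics y x) then
          acc
        else
          let r := count_relic f ny nx relics acc.2
          (acc.1 + r.1, r.2))
      (1, setCell vis y x true)

-- same fuel argument: each recursive call zeroes a fresh kind-valued cell (kind ≠ 0 at every call).
def remove_relic : Nat → Int → Int → Int → List (List Int) → List (List Int)
  | 0, y, x, _, r => setCell r y x 0
  | f+1, y, x, kind, r =>
    pvDIRS.foldl
      (fun cur d =>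
        let ny := y + d.1
        let nx := x + d.2
        if !(is_in_bound ny nx) || (cellI cur ny nx != kind) then cur
        else remove_relic f ny nx kind cur)
      (setCell r y x 0)

def gain_body (st : List (List Bool) × List (List Int) × Int) (y x : Int) :
    List (List Bool) × List (List Int) × Int :=
  if cellB st.1 y x || (cellI st.2.1 y x == 0) then st
  else
    let r := count_relic 25 y x st.2.1 st.1
    if (3:Int) ≤ r.1 then (r.2, remove_relic 25 y x (cellI st.2.1 y x) st.2.1, st.2.2 + r.1)
    else (r.2, st.2.1, st.2.2)

def gain_once (relics : List (List Int)) : Int :=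
  ((PySem.List.pyRange 0 5 1).foldl (fun st y =>
      (PySem.List.pyRange 0 5 1).foldl (fun st x => gain_body st y x) st)
    ((PySem.List.pyRange 0 5 1).map (fun _ => (PySem.List.pyRange 0 5 1).map (fun _ => false)),
      relics, (0 : Int))).2.2

-- ===== PORT B =====
-- component of (sy,sx): saturate the set of same-value 4-connected cells; 25 rounds reach the fixpoint.
def comp_cells (relics : List (List Int)) (sy sx : Int) : PySem.Set (Int × Int) :=
  let v := cellI relics sy sx
  (PySem.List.pyRange 0 25 1).foldl
    (fun cells _ =>
      cells.foldl
        (fun acc (p : Int × Int) =>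
          [(p.1 - 1, p.2), (p.1 + 1, p.2), (p.1, p.2 - 1), (p.1, p.2 + 1)].foldl
            (fun acc2 q =>
              if decide (0 ≤ q.1) && decide (q.1 < 5) && decide (0 ≤ q.2) && decide (q.2 < 5)
                  && (cellI relics q.1 q.2 == v) then
                PySem.Set.add acc2 q
              else acc2)
            acc)
        cells)
    (PySem.Set.ofList [(sy, sx)])

def alt_body (relics : List (List Int)) (t : Int) (y x : Int) : Int :=
  if (cellI relics y x != 0) && decide ((3:Int) ≤ PySem.List.len (comp_cells relics y x)) then
    t + 1
  else t

def gain_once_alt (relics : List (List Int)) : Int :=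
  (PySem.List.pyRange 0 5 1).foldl (fun t y =>
      (PySem.List.pyRange 0 5 1).foldl (fun t x => alt_body relics t y x) t) 0

-- ===== PRECONDITION & SPEC =====
-- Pre_ excludes exactly the inputs on which the Python A raises IndexError: grids with fewer
-- than 5 rows or whose first 5 rows have fewer than 5 entries. A returns on every other input.
def Pre_gain_once (relics : List (List Int)) : Prop :=
  5 ≤ relics.length ∧ ∀ r ∈ relics.take 5, 5 ≤ r.length
instance (relics : List (List Int)) : Decidable (Pre_gain_once relics) := by
  unfold Pre_gain_once; infer_instance

def pvWitness_gain_once : List (List Int) :=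
  [[1, 1, 1, 0, 0], [0, 2, 0, 0, 0], [0, 2, 0, 3, 3], [0, 2, 0, 0, 3], [0, 0, 0, 0, 0]]

def Spec_gain_once (relics : List (List Int)) (out : Int) : Prop := out = gain_once_alt relics
instance (relics : List (List Int)) (out : Int) : Decidable (Spec_gain_once relics out) := by
  unfold Spec_gain_once; infer_instance

-- ===== CLAIM (what is proved, stated in full; the proofs are below) =====
def Claim_equal_gain_once : Prop := ∀ (relics : List (List Int)), Dom_gain_once relics →
  Pre_gain_once relics → Spec_gain_once relics (gain_once relics)

-- ===== LEMMAS AND PROOFS =====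


-- ----- abstract cells and reachability (proof-only helpers) -----
def pvInB (p : Int × Int) : Bool :=
  decide (0 ≤ p.1) && decide (p.1 < 5) && decide (0 ≤ p.2) && decide (p.2 < 5)

def pvAdj (a b : Int × Int) : Bool :=
  (b == (a.1 - 1, a.2)) || (b == (a.1 + 1, a.2)) || (b == (a.1, a.2 - 1)) || (b == (a.1, a.2 + 1))

def allList : List (Int × Int) :=
  [(0,0),(0,1),(0,2),(0,3),(0,4),(1,0),(1,1),(1,2),(1,3),(1,4),(2,0),(2,1),(2,2),(2,3),(2,4),
   (3,0),(3,1),(3,2),(3,3),(3,4),(4,0),(4,1),(4,2),(4,3),(4,4)]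

def allF : Finset (Int × Int) := allList.toFinset

def pvStep (E : Int × Int → Bool) (U : Finset (Int × Int)) (a b : Int × Int) : Prop :=
  pvAdj a b = true ∧ E b = true ∧ b ∉ U

def pvReach (E : Int × Int → Bool) (U : Finset (Int × Int)) (c d : Int × Int) : Prop :=
  Relation.ReflTransGen (pvStep E U) c d

def step0 (g : Int × Int → Int) (v : Int) (a b : Int × Int) : Prop :=
  pvAdj a b = true ∧ pvInB b = true ∧ g b = v

def reach0 (g : Int × Int → Int) (v : Int) (c d : Int × Int) : Prop :=
  Relation.ReflTransGen (step0 g v) c d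

def BigC (g : Int × Int → Int) (c : Int × Int) : Prop :=
  3 ≤ Set.ncard {d | reach0 g (g c) c d}

def countT (E : Int × Int → Bool) : Nat → (Int × Int) → Finset (Int × Int) → Int × Finset (Int × Int)
  | 0, c, U => (1, insert c U)
  | f+1, c, U =>
    pvDIRS.foldl (fun acc d =>
      let n := (c.1 + d.1, c.2 + d.2)
      if !(E n) || decide (n ∈ acc.2) then acc
      else
        let r := countT E f n acc.2
        (acc.1 + r.1, r.2))
      (1, insert c U)

lemma mem_allList (p : Int × Int) : p ∈ allList ↔ pvInB p = true := by
  obtain ⟨y, x⟩ := p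
  constructor
  · intro h; fin_cases h <;> decide
  · intro h
    simp only [pvInB, Bool.and_eq_true, decide_eq_true_eq] at h
    have hy : y = 0 ∨ y = 1 ∨ y = 2 ∨ y = 3 ∨ y = 4 := by omega
    have hx : x = 0 ∨ x = 1 ∨ x = 2 ∨ x = 3 ∨ x = 4 := by omega
    rcases hy with rfl|rfl|rfl|rfl|rfl <;> rcases hx with rfl|rfl|rfl|rfl|rfl <;> decide

lemma nodup_allList : allList.Nodup := by decide

lemma mem_allF (p : Int × Int) : p ∈ allF ↔ pvInB p = true := by
  rw [allF, List.mem_toFinset]; exact mem_allList p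

lemma card_allF : allF.card = 25 := by decide

lemma adj_iff (a b : Int × Int) : pvAdj a b = true ↔
    (b = (a.1 - 1, a.2) ∨ b = (a.1 + 1, a.2) ∨ b = (a.1, a.2 - 1) ∨ b = (a.1, a.2 + 1)) := by
  simp [pvAdj, or_assoc]

lemma adj_symm {a b : Int × Int} (h : pvAdj a b = true) : pvAdj b a = true := by
  obtain ⟨y, x⟩ := a; obtain ⟨y', x'⟩ := b
  simp only [adj_iff, Prod.mk.injEq] at h ⊢
  omega

lemma adj_of_dir {c : Int × Int} {d : Int × Int} (hd : d ∈ pvDIRS) :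
    pvAdj c (c.1 + d.1, c.2 + d.2) = true := by
  rw [adj_iff]
  simp only [pvDIRS, List.mem_cons, List.not_mem_nil, or_false] at hd
  rcases hd with h | h | h | h <;> subst h <;> simp <;> try omega

lemma adj_to_dir {c n : Int × Int} (h : pvAdj c n = true) :
    ∃ d ∈ pvDIRS, n = (c.1 + d.1, c.2 + d.2) := by
  rw [adj_iff] at h
  rcases h with h | h | h | h <;> subst h
  · exact ⟨(-1, 0), by simp [pvDIRS], by simp; try omega⟩
  · exact ⟨(1, 0), by simp [pvDIRS], by simp; try omega⟩
  · exact ⟨(0, -1), by simp [pvDIRS], by simp; try omega⟩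
  · exact ⟨(0, 1), by simp [pvDIRS], by simp; try omega⟩

-- ----- grid shape and get/set lemmas -----
def Shape5 {α : Type} (m : List (List α)) : Prop :=
  5 ≤ m.length ∧ ∀ r ∈ m.take 5, 5 ≤ r.length

lemma row_len5 {α : Type} {m : List (List α)} (hm : Shape5 m) {i : Nat} (hi : i < 5)
    (him : i < m.length) : 5 ≤ (m[i]).length := by
  have hmem : m[i] ∈ m.take 5 := by
    have h5 : i < (m.take 5).length := by simp [List.length_take]; omega
    have := List.getElem_mem h5
    rwa [List.getElem_take] at this
  exact hm.2 _ hmem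

lemma shape5_set {α : Type} {m : List (List α)} (hm : Shape5 m) {p : Int × Int}
    (hp : pvInB p = true) (v : α) : Shape5 (setCell m p.1 p.2 v) := by
  obtain ⟨py, px⟩ := p
  simp only [pvInB, Bool.and_eq_true, decide_eq_true_eq] at hp
  obtain ⟨⟨⟨h1, h2⟩, h3⟩, h4⟩ := hp
  obtain ⟨hl, hr⟩ := hm
  have hyn : py.toNat < m.length := by omega
  rw [setCell, PySem.List.pySetD_of_nonneg _ _ h1, PySem.List.pySetD_of_nonneg _ _ h3,
    PySem.List.pyGetD_eq_getElem _ _ h1 (by omega)]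
  refine ⟨by simpa using hl, ?_⟩
  intro r hrmem
  rw [List.take_set] at hrmem
  rcases List.mem_or_eq_of_mem_set hrmem with h | h
  · exact hr r h
  · subst h
    rw [List.length_set]
    have : m[py.toNat] ∈ m.take 5 := by
      have h5 : py.toNat < (m.take 5).length := by simp [List.length_take]; omega
      have := List.getElem_mem h5
      rwa [List.getElem_take] at this
    exact hr _ this

lemma cellG_set {α : Type} (d : α) {m : List (List α)} (hm : Shape5 m) {p q : Int × Int}
    (hp : pvInB p = true) (hq : pvInB q = true) (v : α) :
    cellG d (setCell m p.1 p.2 v) q.1 q.2 = if q = p then v else cellG d m q.1 q.2 := by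
  obtain ⟨py, px⟩ := p; obtain ⟨qy, qx⟩ := q
  simp only [pvInB, Bool.and_eq_true, decide_eq_true_eq] at hp hq
  obtain ⟨⟨⟨h1, h2⟩, h3⟩, h4⟩ := hp
  obtain ⟨⟨⟨g1, g2⟩, g3⟩, g4⟩ := hq
  obtain ⟨hl, hr⟩ := hm
  have hpy : py.toNat < m.length := by omega
  have hrow5 : 5 ≤ (m[py.toNat]).length := row_len5 ⟨hl, hr⟩ (by omega) hpy
  rw [setCell, PySem.List.pySetD_of_nonneg _ _ h1, PySem.List.pySetD_of_nonneg _ _ h3,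
    PySem.List.pyGetD_eq_getElem _ _ h1 (by omega)]
  rw [cellG, cellG, PySem.List.pyGet?_of_nonneg _ g1, PySem.List.pyGet?_of_nonneg _ g1]
  by_cases hy : qy.toNat = py.toNat
  · rw [hy, List.getElem?_set_self hpy, List.getElem?_eq_getElem hpy]
    simp only [Option.bind_some]
    rw [PySem.List.pyGet?_of_nonneg _ g3, PySem.List.pyGet?_of_nonneg _ g3]
    by_cases hx : qx.toNat = px.toNat
    · rw [hx, List.getElem?_set_self (by omega : px.toNat < (m[py.toNat]).length)]
      have hqp : ((qy, qx) : Int × Int) = (py, px) := by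
        simp only [Prod.mk.injEq]; omega
      rw [if_pos hqp]; rfl
    · rw [List.getElem?_set_ne (fun hh => hx hh.symm)]
      have hqp : ((qy, qx) : Int × Int) ≠ (py, px) := by
        simp only [ne_eq, Prod.mk.injEq]; omega
      rw [if_neg hqp]
  · rw [List.getElem?_set_ne (fun hh => hy hh.symm)]
    have hqp : ((qy, qx) : Int × Int) ≠ (py, px) := by
      simp only [ne_eq, Prod.mk.injEq]; omega
    rw [if_neg hqp]


-- ----- reachability lemmas -----
lemma reach_mono {E : (Int × Int) → Bool} {U W : Finset (Int × Int)} {c d : Int × Int}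
    (hUW : U ⊆ W) (h : pvReach E W c d) : pvReach E U c d :=
  Relation.ReflTransGen.mono (fun _ _ hb => ⟨hb.1, hb.2.1, fun hU => hb.2.2 (hUW hU)⟩) h

lemma reach0_val {g : (Int × Int) → Int} {v : Int} {c d : Int × Int} (h : reach0 g v c d) :
    d = c ∨ (pvInB d = true ∧ g d = v) := by
  rcases h.cases_tail with h | ⟨e, _, hs⟩
  · exact Or.inl h
  · exact Or.inr ⟨hs.2.1, hs.2.2⟩

lemma reach0_symm {g : (Int × Int) → Int} {v : Int} {c d : Int × Int}
    (hc : pvInB c = true) (hv : g c = v) (h : reach0 g v c d) : reach0 g v d c := by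
  induction h with
  | refl => exact Relation.ReflTransGen.refl
  | tail h1 h2 ih =>
    refine Relation.ReflTransGen.head ⟨adj_symm h2.1, ?_, ?_⟩ ih
    · rcases reach0_val h1 with rfl | hh
      · exact hc
      · exact hh.1
    · rcases reach0_val h1 with rfl | hh
      · exact hv
      · exact hh.2

lemma reachE_iff_reach0 {E : (Int × Int) → Bool} {U : Finset (Int × Int)}
    {g : (Int × Int) → Int} {v : Int} {c : Int × Int}
    (H1 : ∀ x, reach0 g v c x → x ∉ U)
    (H2 : ∀ x, x ∉ U → (E x = true ↔ (pvInB x = true ∧ g x = v))) :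
    ∀ d, pvReach E U c d ↔ reach0 g v c d := by
  intro d
  constructor
  · intro h
    induction h with
    | refl => exact Relation.ReflTransGen.refl
    | tail h1 h2 ih =>
      exact ih.tail ⟨h2.1, ((H2 _ h2.2.2).1 h2.2.1).1, ((H2 _ h2.2.2).1 h2.2.1).2⟩
  · intro h
    induction h with
    | refl => exact Relation.ReflTransGen.refl
    | tail h1 h2 ih =>
      have hbU := H1 _ (h1.tail h2)
      exact ih.tail ⟨h2.1, (H2 _ hbU).2 ⟨h2.2.1, h2.2.2⟩, hbU⟩

-- ----- the DFS theorem: countT computes avoid-set ∪ reachable set, and counts the new cells -----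
def dfsStep (E : (Int × Int) → Bool) (f : Nat) (c : Int × Int) :
    (Int × Finset (Int × Int)) → (Int × Int) → (Int × Finset (Int × Int)) :=
  fun acc d =>
    let n := (c.1 + d.1, c.2 + d.2)
    if !(E n) || decide (n ∈ acc.2) then acc
    else
      let r := countT E f n acc.2
      (acc.1 + r.1, r.2)

theorem countT_spec (E : (Int × Int) → Bool) (hE : ∀ b, E b = true → pvInB b = true) :
    ∀ (f : Nat) (c : Int × Int) (U : Finset (Int × Int)),
    pvInB c = true → c ∉ U → U ⊆ allF → (allF \ U).card ≤ f →
    U ⊆ (countT E f c U).2 ∧ c ∈ (countT E f c U).2 ∧ (countT E f c U).2 ⊆ allF ∧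
    (∀ d, d ∈ (countT E f c U).2 ↔ d ∈ U ∨ pvReach E U c d) ∧
    (countT E f c U).1 = ((countT E f c U).2.card : Int) - (U.card : Int) := by
  intro f
  induction f with
  | zero =>
    intro c U hc hcU hUa hcard
    exfalso
    have hmem : c ∈ allF \ U := Finset.mem_sdiff.2 ⟨(mem_allF c).2 hc, hcU⟩
    have := Finset.card_pos.2 ⟨c, hmem⟩
    omega
  | succ f IH =>
    intro c U hc hcU hUa hcard
    have hcallF : c ∈ allF := (mem_allF c).2 hc
    have hins_sub : insert c U ⊆ allF := Finset.insert_subset hcallF hUa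
    have main : ∀ (ds : List (Int × Int)) (acc : Int × Finset (Int × Int)),
        (∀ dd ∈ ds, dd ∈ pvDIRS) →
        insert c U ⊆ acc.2 → acc.2 ⊆ allF →
        (∀ d ∈ acc.2, d ∈ U ∨ pvReach E U c d) →
        acc.1 = (acc.2.card : Int) - (U.card : Int) →
        (∀ a ∈ acc.2, a ∉ insert c U → ∀ b, pvAdj a b = true → E b = true → b ∈ acc.2) →
        acc.2 ⊆ (ds.foldl (dfsStep E f c) acc).2 ∧
        insert c U ⊆ (ds.foldl (dfsStep E f c) acc).2 ∧ (ds.foldl (dfsStep E f c) acc).2 ⊆ allF ∧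
        (∀ d ∈ (ds.foldl (dfsStep E f c) acc).2, d ∈ U ∨ pvReach E U c d) ∧
        (ds.foldl (dfsStep E f c) acc).1 = (((ds.foldl (dfsStep E f c) acc).2.card : Int)) - (U.card : Int) ∧
        (∀ a ∈ (ds.foldl (dfsStep E f c) acc).2, a ∉ insert c U →
          ∀ b, pvAdj a b = true → E b = true → b ∈ (ds.foldl (dfsStep E f c) acc).2) ∧
        (∀ dd ∈ ds, E (c.1 + dd.1, c.2 + dd.2) = true → (c.1 + dd.1, c.2 + dd.2) ∈ (ds.foldl (dfsStep E f c) acc).2) := by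
      intro ds
      induction ds with
      | nil =>
        intro acc _ h1 h2 h3 h4 h5
        exact ⟨Finset.Subset.refl _, h1, h2, h3, h4, h5, by simp⟩
      | cons dd ds ihds =>
        intro acc hdirs h1 h2 h3 h4 h5
        rw [List.foldl_cons]
        by_cases hg : (!(E (c.1 + dd.1, c.2 + dd.2)) || decide ((c.1 + dd.1, c.2 + dd.2) ∈ acc.2)) = true
        · -- skipped
          have hstep : dfsStep E f c acc dd = acc := by
            simp only [dfsStep, hg, if_pos]
          rw [hstep]
          obtain ⟨m1, m2, m3, m4, m5, m6, m7⟩ :=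
            ihds acc (fun x hx => hdirs x (List.mem_cons_of_mem _ hx)) h1 h2 h3 h4 h5
          refine ⟨m1, m2, m3, m4, m5, m6, ?_⟩
          intro d hd hEd
          rcases List.mem_cons.1 hd with rfl | hd'
          · -- dd itself was skipped: it must already be in acc.2
            have : ((c.1 + d.1, c.2 + d.2) ∈ acc.2) := by
              simp only [hEd, Bool.not_true, Bool.false_or, decide_eq_true_eq] at hg
              exact hg
            exact m1 this
          · exact m7 d hd' hEd
        · -- recursive call
          set n := (c.1 + dd.1, c.2 + dd.2) with hn
          simp only [Bool.or_eq_true, Bool.not_eq_true', decide_eq_true_eq, not_or,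
            Bool.not_eq_false] at hg
          obtain ⟨hEn, hnacc⟩ := hg
          have hstep : dfsStep E f c acc dd
              = (acc.1 + (countT E f n acc.2).1, (countT E f n acc.2).2) := by
            simp only [dfsStep, ← hn, hEn, hnacc, Bool.not_true,
              decide_eq_false, Bool.or_self, if_neg, Bool.false_eq_true, not_false_eq_true]
          rw [hstep]
          -- fuel bound for the recursive call
          have hcerase : allF \ acc.2 ⊆ (allF \ U).erase c := by
            intro x hx
            rw [Finset.mem_sdiff] at hx
            refine Finset.mem_erase.2 ⟨?_, Finset.mem_sdiff.2 ⟨hx.1, ?_⟩⟩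
            · rintro rfl; exact hx.2 (h1 (Finset.mem_insert_self _ U))
            · intro hxU; exact hx.2 (h1 (Finset.mem_insert_of_mem hxU))
          have hfuel : (allF \ acc.2).card ≤ f := by
            have h1c : (allF \ acc.2).card ≤ ((allF \ U).erase c).card := Finset.card_le_card hcerase
            have h2c : ((allF \ U).erase c).card = (allF \ U).card - 1 :=
              Finset.card_erase_of_mem (Finset.mem_sdiff.2 ⟨hcallF, hcU⟩)
            have h3c : 0 < (allF \ U).card :=
              Finset.card_pos.2 ⟨c, Finset.mem_sdiff.2 ⟨hcallF, hcU⟩⟩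
            omega
          obtain ⟨r1, r2, r3, r4, r5⟩ := IH n acc.2 (hE _ hEn) hnacc h2 hfuel
          have hddDIR : dd ∈ pvDIRS := hdirs dd (List.mem_cons_self)
          have hUacc : U ⊆ acc.2 := fun x hx => h1 (Finset.mem_insert_of_mem hx)
          have hnU : n ∉ U := fun hx => hnacc (hUacc hx)
          have hreach_cn : pvReach E U c n :=
            Relation.ReflTransGen.single ⟨adj_of_dir hddDIR, hEn, hnU⟩
          -- invariants for the new accumulator
          have a1 : insert c U ⊆ (countT E f n acc.2).2 := h1.trans r1
          have a2 : (countT E f n acc.2).2 ⊆ allF := r3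
          have a3 : ∀ d ∈ (countT E f n acc.2).2, d ∈ U ∨ pvReach E U c d := by
            intro d hd
            rcases (r4 d).1 hd with hd' | hd'
            · exact h3 d hd'
            · exact Or.inr (hreach_cn.trans (reach_mono hUacc hd'))
          have a4 : acc.1 + (countT E f n acc.2).1
              = (((countT E f n acc.2).2.card : Int)) - (U.card : Int) := by
            rw [h4, r5]; ring
          have a5 : ∀ a ∈ (countT E f n acc.2).2, a ∉ insert c U →
              ∀ b, pvAdj a b = true → E b = true → b ∈ (countT E f n acc.2).2 := by
            intro a ha hains b hadj hEb
            by_cases haacc : a ∈ acc.2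
            · exact r1 (h5 a haacc hains b hadj hEb)
            · have hra : pvReach E acc.2 n a := by
                rcases (r4 a).1 ha with h' | h'
                · exact absurd h' haacc
                · exact h'
              by_cases hbacc : b ∈ acc.2
              · exact r1 hbacc
              · exact (r4 b).2 (Or.inr (hra.tail ⟨hadj, hEb, hbacc⟩))
          obtain ⟨m1, m2, m3, m4, m5, m6, m7⟩ :=
            ihds (acc.1 + (countT E f n acc.2).1, (countT E f n acc.2).2)
              (fun x hx => hdirs x (List.mem_cons_of_mem _ hx)) a1 a2 a3 a4 a5
          refine ⟨r1.trans m1, m2, m3, m4, m5, m6, ?_⟩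
          intro d hd hEd
          rcases List.mem_cons.1 hd with rfl | hd'
          · exact m1 r2
          · exact m7 d hd' hEd
    have hunf : countT E (f+1) c U = pvDIRS.foldl (dfsStep E f c) (1, insert c U) := rfl
    have init1 : insert c U ⊆ ((1 : Int), insert c U).2 := Finset.Subset.refl _
    have init2 : ((1 : Int), insert c U).2 ⊆ allF := hins_sub
    have init3 : ∀ d ∈ ((1 : Int), insert c U).2, d ∈ U ∨ pvReach E U c d := by
      intro d hd
      rcases Finset.mem_insert.1 hd with rfl | hd'
      · exact Or.inr Relation.ReflTransGen.refl
      · exact Or.inl hd'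
    have init4 : ((1 : Int), insert c U).1
        = (((1 : Int), insert c U).2.card : Int) - (U.card : Int) := by
      simp [Finset.card_insert_of_notMem hcU]
    have init5 : ∀ a ∈ ((1 : Int), insert c U).2, a ∉ insert c U →
        ∀ b, pvAdj a b = true → E b = true → b ∈ ((1 : Int), insert c U).2 := by
      intro a ha hains; exact absurd ha hains
    obtain ⟨m1, m2, m3, m4, m5, m6, m7⟩ :=
      main pvDIRS (1, insert c U) (fun _ hx => hx) init1 init2 init3 init4 init5
    rw [hunf]
    refine ⟨fun x hx => m2 (Finset.mem_insert_of_mem hx), m2 (Finset.mem_insert_self c U), m3,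
      ?_, m5⟩
    intro d
    constructor
    · intro hd
      exact m4 d hd
    · intro hd
      rcases hd with hd | hd
      · exact m2 (Finset.mem_insert_of_mem hd)
      · -- completeness: everything reachable is collected
        induction hd with
        | refl => exact m2 (Finset.mem_insert_self c U)
        | tail h1 h2 ih =>
          rename_i a b
          by_cases hac : a = c
          · subst hac
            obtain ⟨dd, hdd, rfl⟩ := adj_to_dir h2.1
            exact m7 dd hdd h2.2.1
          · have haU : a ∉ U := by
              rcases h1.cases_tail with h' | ⟨e, _, hs⟩
              · exact absurd h' hac
              · exact hs.2.2
            have hains : a ∉ insert c U := by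
              simp only [Finset.mem_insert]
              rintro (rfl | h')
              · exact hac rfl
              · exact haU h'
            exact m6 a ih hains b h2.1 h2.2.1


-- ----- correspondence of the concrete ports with the abstract countT -----
def VisCorr (vis : List (List Bool)) (V : Finset (Int × Int)) : Prop :=
  ∀ p : Int × Int, pvInB p = true → (cellB vis p.1 p.2 = true ↔ p ∈ V)

def RelCorr (rel : List (List Int)) (Z : Finset (Int × Int)) (g0 : (Int × Int) → Int) : Prop :=
  ∀ p : Int × Int, pvInB p = true → cellI rel p.1 p.2 = if p ∈ Z then 0 else g0 p

def Ec (rel : List (List Int)) (v : Int) : (Int × Int) → Bool :=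
  fun n => pvInB n && (cellI rel n.1 n.2 == v)

def Er (g0 : (Int × Int) → Int) (kind : Int) : (Int × Int) → Bool :=
  fun n => pvInB n && (g0 n == kind)

lemma inb_eq (y x : Int) : is_in_bound y x = pvInB (y, x) := rfl

lemma visCorr_set {vis : List (List Bool)} {V : Finset (Int × Int)} (h5 : Shape5 vis)
    (hvc : VisCorr vis V) {c : Int × Int} (hc : pvInB c = true) :
    VisCorr (setCell vis c.1 c.2 true) (insert c V) := by
  intro p hp
  rw [cellB, cellG_set false h5 hc hp true]
  by_cases hpc : p = c
  · simp [hpc]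
  · rw [if_neg hpc]
    rw [Finset.mem_insert]
    simp only [hpc, false_or]
    exact hvc p hp

lemma relCorr_set {rel : List (List Int)} {Z : Finset (Int × Int)} {g0 : (Int × Int) → Int}
    (h5 : Shape5 rel) (hrc : RelCorr rel Z g0) {c : Int × Int} (hc : pvInB c = true) :
    RelCorr (setCell rel c.1 c.2 0) (insert c Z) g0 := by
  intro p hp
  rw [cellI, cellG_set 0 h5 hc hp 0]
  by_cases hpc : p = c
  · simp [hpc]
  · rw [if_neg hpc]
    simp only [Finset.mem_insert, hpc, false_or]
    exact hrc p hp

def cntStep (rel : List (List Int)) (f : Nat) (y x : Int) :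
    (Int × List (List Bool)) → (Int × Int) → (Int × List (List Bool)) :=
  fun acc d =>
    let ny := y + d.1
    let nx := x + d.2
    if !(is_in_bound ny nx) || cellB acc.2 ny nx || (cellI rel ny nx != cellI rel y x) then
      acc
    else
      let r := count_relic f ny nx rel acc.2
      (acc.1 + r.1, r.2)

def remStep (kind : Int) (f : Nat) (y x : Int) :
    List (List Int) → (Int × Int) → List (List Int) :=
  fun cur d =>
    let ny := y + d.1
    let nx := x + d.2
    if !(is_in_bound ny nx) || (cellI cur ny nx != kind) then cur
    else remove_relic f ny nx kind cur

lemma corr_count (rel : List (List Int)) (v : Int) :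
    ∀ (f : Nat) (c : Int × Int) (vis : List (List Bool)) (V : Finset (Int × Int)),
    Shape5 vis → VisCorr vis V → pvInB c = true → cellI rel c.1 c.2 = v →
    (count_relic f c.1 c.2 rel vis).1 = (countT (Ec rel v) f c V).1 ∧
    Shape5 (count_relic f c.1 c.2 rel vis).2 ∧
    VisCorr (count_relic f c.1 c.2 rel vis).2 (countT (Ec rel v) f c V).2 := by
  intro f
  induction f with
  | zero =>
    intro c vis V h5 hvc hc hval
    exact ⟨rfl, shape5_set h5 hc true, visCorr_set h5 hvc hc⟩
  | succ f IHf =>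
    intro c vis V h5 hvc hc hval
    have hport : count_relic (f+1) c.1 c.2 rel vis
        = pvDIRS.foldl (cntStep rel f c.1 c.2) (1, setCell vis c.1 c.2 true) := rfl
    have htwin : countT (Ec rel v) (f+1) c V
        = pvDIRS.foldl (dfsStep (Ec rel v) f c) (1, insert c V) := rfl
    rw [hport, htwin]
    have main : ∀ (ds : List (Int × Int)) (acc : Int × List (List Bool))
        (accT : Int × Finset (Int × Int)),
        acc.1 = accT.1 → Shape5 acc.2 → VisCorr acc.2 accT.2 →
        (ds.foldl (cntStep rel f c.1 c.2) acc).1 = (ds.foldl (dfsStep (Ec rel v) f c) accT).1 ∧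
        Shape5 (ds.foldl (cntStep rel f c.1 c.2) acc).2 ∧
        VisCorr (ds.foldl (cntStep rel f c.1 c.2) acc).2
          (ds.foldl (dfsStep (Ec rel v) f c) accT).2 := by
      intro ds
      induction ds with
      | nil => intro acc accT e h5' hvc'; exact ⟨e, h5', hvc'⟩
      | cons dd ds ihds =>
        intro acc accT e h5' hvc'
        rw [List.foldl_cons, List.foldl_cons]
        by_cases hb : pvInB (c.1 + dd.1, c.2 + dd.2) = true
        · by_cases hmem : (c.1 + dd.1, c.2 + dd.2) ∈ accT.2
          · have hcb : cellB acc.2 (c.1 + dd.1) (c.2 + dd.2) = true :=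
              (hvc' (c.1 + dd.1, c.2 + dd.2) hb).2 hmem
            have hp : cntStep rel f c.1 c.2 acc dd = acc := by
              simp only [cntStep, hcb, Bool.or_true, Bool.true_or, if_true]
            have ht : dfsStep (Ec rel v) f c accT dd = accT := by
              simp only [dfsStep, hmem, decide_true, Bool.or_true, if_true]
            rw [hp, ht]; exact ihds acc accT e h5' hvc'
          · have hcb : cellB acc.2 (c.1 + dd.1) (c.2 + dd.2) = false := by
              have := (hvc' (c.1 + dd.1, c.2 + dd.2) hb)
              rw [← Bool.not_eq_true]
              intro hx; exact hmem (this.1 hx)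
            by_cases hvn : cellI rel (c.1 + dd.1) (c.2 + dd.2) = v
            · -- both recurse
              have hEc : Ec rel v (c.1 + dd.1, c.2 + dd.2) = true := by
                simp [Ec, hb, hvn]
              have hp : cntStep rel f c.1 c.2 acc dd
                  = (acc.1 + (count_relic f (c.1 + dd.1) (c.2 + dd.2) rel acc.2).1,
                     (count_relic f (c.1 + dd.1) (c.2 + dd.2) rel acc.2).2) := by
                simp only [cntStep, inb_eq, hb, hcb, hval, hvn, bne_self_eq_false,
                  Bool.not_true, Bool.or_false, if_false, Bool.false_eq_true]
              have ht : dfsStep (Ec rel v) f c accT dd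
                  = (accT.1 + (countT (Ec rel v) f (c.1 + dd.1, c.2 + dd.2) accT.2).1,
                     (countT (Ec rel v) f (c.1 + dd.1, c.2 + dd.2) accT.2).2) := by
                simp only [dfsStep, hEc, hmem, decide_false, Bool.not_true, Bool.or_false,
                  if_false, Bool.false_eq_true]
              rw [hp, ht]
              obtain ⟨e', h5'', hvc''⟩ := IHf (c.1 + dd.1, c.2 + dd.2) acc.2 accT.2 h5' hvc' hb hvn
              exact ihds _ _ (by simp [e, e']) h5'' hvc''
            · -- value mismatch: both skip
              have hEc : Ec rel v (c.1 + dd.1, c.2 + dd.2) = false := by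
                simp [Ec, hb, hvn]
              have hp : cntStep rel f c.1 c.2 acc dd = acc := by
                have : (cellI rel (c.1 + dd.1) (c.2 + dd.2) != cellI rel c.1 c.2) = true := by
                  rw [hval]; simpa using hvn
                simp only [cntStep, this, Bool.or_true, if_true]
              have ht : dfsStep (Ec rel v) f c accT dd = accT := by
                simp only [dfsStep, hEc, Bool.not_false, Bool.true_or, if_true]
              rw [hp, ht]; exact ihds acc accT e h5' hvc'
        · -- out of bounds: both skip
          have hb' : pvInB (c.1 + dd.1, c.2 + dd.2) = false := by
            rwa [Bool.not_eq_true] at hb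
          have hp : cntStep rel f c.1 c.2 acc dd = acc := by
            simp only [cntStep, inb_eq, hb', Bool.not_false, Bool.true_or, if_true]
          have ht : dfsStep (Ec rel v) f c accT dd = accT := by
            have hEc : Ec rel v (c.1 + dd.1, c.2 + dd.2) = false := by
              simp [Ec, hb']
            simp only [dfsStep, hEc, Bool.not_false, Bool.true_or, if_true]
          rw [hp, ht]; exact ihds acc accT e h5' hvc'
    exact main pvDIRS (1, setCell vis c.1 c.2 true) (1, insert c V) rfl
      (shape5_set h5 hc true) (visCorr_set h5 hvc hc)

lemma corr_remove (g0 : (Int × Int) → Int) (kind : Int) (hk : kind ≠ 0) :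
    ∀ (f : Nat) (c : Int × Int) (cur : List (List Int)) (Z : Finset (Int × Int)),
    Shape5 cur → RelCorr cur Z g0 → pvInB c = true →
    Shape5 (remove_relic f c.1 c.2 kind cur) ∧
    RelCorr (remove_relic f c.1 c.2 kind cur) (countT (Er g0 kind) f c Z).2 g0 := by
  intro f
  induction f with
  | zero =>
    intro c cur Z h5 hrc hc
    exact ⟨shape5_set h5 hc 0, relCorr_set h5 hrc hc⟩
  | succ f IHf =>
    intro c cur Z h5 hrc hc
    have hport : remove_relic (f+1) c.1 c.2 kind cur
        = pvDIRS.foldl (remStep kind f c.1 c.2) (setCell cur c.1 c.2 0) := rfl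
    have htwin : countT (Er g0 kind) (f+1) c Z
        = pvDIRS.foldl (dfsStep (Er g0 kind) f c) (1, insert c Z) := rfl
    rw [hport, htwin]
    have main : ∀ (ds : List (Int × Int)) (cur' : List (List Int))
        (accT : Int × Finset (Int × Int)),
        Shape5 cur' → RelCorr cur' accT.2 g0 →
        Shape5 (ds.foldl (remStep kind f c.1 c.2) cur') ∧
        RelCorr (ds.foldl (remStep kind f c.1 c.2) cur')
          (ds.foldl (dfsStep (Er g0 kind) f c) accT).2 g0 := by
      intro ds
      induction ds with
      | nil => intro cur' accT h5' hrc'; exact ⟨h5', hrc'⟩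
      | cons dd ds ihds =>
        intro cur' accT h5' hrc'
        rw [List.foldl_cons, List.foldl_cons]
        by_cases hb : pvInB (c.1 + dd.1, c.2 + dd.2) = true
        · have hcell : cellI cur' (c.1 + dd.1) (c.2 + dd.2)
              = if (c.1 + dd.1, c.2 + dd.2) ∈ accT.2 then 0 else g0 (c.1 + dd.1, c.2 + dd.2) :=
            hrc' (c.1 + dd.1, c.2 + dd.2) hb
          by_cases hmem : (c.1 + dd.1, c.2 + dd.2) ∈ accT.2
          · have hp : remStep kind f c.1 c.2 cur' dd = cur' := by
              have : (cellI cur' (c.1 + dd.1) (c.2 + dd.2) != kind) = true := by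
                rw [hcell, if_pos hmem]; simpa using (Ne.symm hk)
              simp only [remStep, this, Bool.or_true, if_true]
            have ht : dfsStep (Er g0 kind) f c accT dd = accT := by
              simp only [dfsStep, hmem, decide_true, Bool.or_true, if_true]
            rw [hp, ht]; exact ihds cur' accT h5' hrc'
          · rw [if_neg hmem] at hcell
            by_cases hvn : g0 (c.1 + dd.1, c.2 + dd.2) = kind
            · have hEr : Er g0 kind (c.1 + dd.1, c.2 + dd.2) = true := by
                simp [Er, hb, hvn]
              have hp : remStep kind f c.1 c.2 cur' dd
                  = remove_relic f (c.1 + dd.1) (c.2 + dd.2) kind cur' := by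
                simp only [remStep, inb_eq, hb, hcell, hvn, bne_self_eq_false, Bool.not_true,
                  Bool.or_false, if_false, Bool.false_eq_true]
              have ht : dfsStep (Er g0 kind) f c accT dd
                  = (accT.1 + (countT (Er g0 kind) f (c.1 + dd.1, c.2 + dd.2) accT.2).1,
                     (countT (Er g0 kind) f (c.1 + dd.1, c.2 + dd.2) accT.2).2) := by
                simp only [dfsStep, hEr, hmem, decide_false, Bool.not_true, Bool.or_false,
                  if_false, Bool.false_eq_true]
              rw [hp, ht]
              obtain ⟨h5'', hrc''⟩ := IHf (c.1 + dd.1, c.2 + dd.2) cur' accT.2 h5' hrc' hb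
              exact ihds _ _ h5'' hrc''
            · have hEr : Er g0 kind (c.1 + dd.1, c.2 + dd.2) = false := by
                simp [Er, hb, hvn]
              have hp : remStep kind f c.1 c.2 cur' dd = cur' := by
                have : (cellI cur' (c.1 + dd.1) (c.2 + dd.2) != kind) = true := by
                  rw [hcell]; simpa using hvn
                simp only [remStep, this, Bool.or_true, if_true]
              have ht : dfsStep (Er g0 kind) f c accT dd = accT := by
                simp only [dfsStep, hEr, Bool.not_false, Bool.true_or, if_true]
              rw [hp, ht]; exact ihds cur' accT h5' hrc'
        · have hb' : pvInB (c.1 + dd.1, c.2 + dd.2) = false := by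
            rwa [Bool.not_eq_true] at hb
          have hp : remStep kind f c.1 c.2 cur' dd = cur' := by
            simp only [remStep, inb_eq, hb', Bool.not_false, Bool.true_or, if_true]
          have ht : dfsStep (Er g0 kind) f c accT dd = accT := by
            have hEr : Er g0 kind (c.1 + dd.1, c.2 + dd.2) = false := by
              simp [Er, hb']
            simp only [dfsStep, hEr, Bool.not_false, Bool.true_or, if_true]
          rw [hp, ht]; exact ihds cur' accT h5' hrc'
    exact main pvDIRS (setCell cur c.1 c.2 0) (1, insert c Z)
      (shape5_set h5 hc 0) (relCorr_set h5 hrc hc)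


-- ----- B side: saturation computes the component -----
def pvNbrs (p : Int × Int) : List (Int × Int) :=
  [(p.1 - 1, p.2), (p.1 + 1, p.2), (p.1, p.2 - 1), (p.1, p.2 + 1)]

def satStep (rel : List (List Int)) (v : Int) (S : PySem.Set (Int × Int)) :
    PySem.Set (Int × Int) :=
  S.foldl
    (fun acc (p : Int × Int) =>
      (pvNbrs p).foldl
        (fun acc2 q =>
          if decide (0 ≤ q.1) && decide (q.1 < 5) && decide (0 ≤ q.2) && decide (q.2 < 5)
              && (cellI rel q.1 q.2 == v) then
            PySem.Set.add acc2 q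
          else acc2)
        acc)
    S

lemma mem_nbrs (p q : Int × Int) : q ∈ pvNbrs p ↔ pvAdj p q = true := by
  rw [adj_iff]; simp [pvNbrs]

lemma satGuard (rel : List (List Int)) (v : Int) (q : Int × Int) :
    (decide (0 ≤ q.1) && decide (q.1 < 5) && decide (0 ≤ q.2) && decide (q.2 < 5)
      && (cellI rel q.1 q.2 == v)) = Ec rel v q := rfl

lemma Ec_iff (rel : List (List Int)) (v : Int) (q : Int × Int) :
    Ec rel v q = true ↔ (pvInB q = true ∧ cellI rel q.1 q.2 = v) := by
  simp [Ec]

lemma inner_mem (rel : List (List Int)) (v : Int) :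
    ∀ (L : List (Int × Int)) (acc : PySem.Set (Int × Int)) (q : Int × Int),
    q ∈ L.foldl
        (fun acc2 q =>
          if decide (0 ≤ q.1) && decide (q.1 < 5) && decide (0 ≤ q.2) && decide (q.2 < 5)
              && (cellI rel q.1 q.2 == v) then
            PySem.Set.add acc2 q
          else acc2) acc
      ↔ q ∈ acc ∨ (q ∈ L ∧ Ec rel v q = true) := by
  intro L
  induction L with
  | nil => simp
  | cons a L ih =>
    intro acc q
    rw [List.foldl_cons]
    by_cases hg : Ec rel v a = true
    · rw [satGuard, hg, if_pos rfl, ih]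
      rw [PySem.Set.mem_add]
      constructor
      · rintro ((h | rfl) | h)
        · exact Or.inl h
        · exact Or.inr ⟨List.mem_cons_self, hg⟩
        · exact Or.inr ⟨List.mem_cons_of_mem _ h.1, h.2⟩
      · rintro (h | ⟨hm, hE⟩)
        · exact Or.inl (Or.inl h)
        · rcases List.mem_cons.1 hm with rfl | hm'
          · exact Or.inl (Or.inr rfl)
          · exact Or.inr ⟨hm', hE⟩
    · rw [satGuard, if_neg (by simpa using hg), ih]
      constructor
      · rintro (h | h)
        · exact Or.inl h
        · exact Or.inr ⟨List.mem_cons_of_mem _ h.1, h.2⟩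
      · rintro (h | ⟨hm, hE⟩)
        · exact Or.inl h
        · rcases List.mem_cons.1 hm with rfl | hm'
          · exact absurd hE hg
          · exact Or.inr ⟨hm', hE⟩

lemma inner_nodup (rel : List (List Int)) (v : Int) :
    ∀ (L : List (Int × Int)) (acc : PySem.Set (Int × Int)), acc.Nodup →
    (L.foldl
        (fun acc2 q =>
          if decide (0 ≤ q.1) && decide (q.1 < 5) && decide (0 ≤ q.2) && decide (q.2 < 5)
              && (cellI rel q.1 q.2 == v) then
            PySem.Set.add acc2 q
          else acc2) acc).Nodup := by
  intro L
  induction L with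
  | nil => intro acc h; exact h
  | cons a L ih =>
    intro acc h
    rw [List.foldl_cons]
    by_cases hg : (decide (0 ≤ a.1) && decide (a.1 < 5) && decide (0 ≤ a.2) && decide (a.2 < 5)
        && (cellI rel a.1 a.2 == v)) = true
    · rw [hg, if_pos rfl]; exact ih _ (PySem.Set.nodup_add _ _ h)
    · rw [if_neg (by simpa using hg)]; exact ih _ h

lemma foldl_grow {α β : Type} (g : List β → α → List β)
    (hg : ∀ s a, s.length ≤ (g s a).length ∧ ((g s a).length = s.length → g s a = s)) :
    ∀ (l : List α) (s : List β),
    s.length ≤ (l.foldl g s).length ∧ ((l.foldl g s).length = s.length → l.foldl g s = s) := by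
  intro l
  induction l with
  | nil => intro s; exact ⟨le_refl _, fun _ => rfl⟩
  | cons a l ih =>
    intro s
    rw [List.foldl_cons]
    obtain ⟨hle, heq⟩ := ih (g s a)
    obtain ⟨hle', heq'⟩ := hg s a
    refine ⟨hle'.trans hle, fun h => ?_⟩
    have h1 : (g s a).length = s.length := by omega
    have h2 := heq' h1
    rw [h2] at h heq ⊢
    exact heq h

lemma addIf_grow (rel : List (List Int)) (v : Int) (s : PySem.Set (Int × Int)) (q : Int × Int) :
    s.length ≤ (if decide (0 ≤ q.1) && decide (q.1 < 5) && decide (0 ≤ q.2) && decide (q.2 < 5)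
        && (cellI rel q.1 q.2 == v) then PySem.Set.add s q else s).length ∧
    ((if decide (0 ≤ q.1) && decide (q.1 < 5) && decide (0 ≤ q.2) && decide (q.2 < 5)
        && (cellI rel q.1 q.2 == v) then PySem.Set.add s q else s).length = s.length →
      (if decide (0 ≤ q.1) && decide (q.1 < 5) && decide (0 ≤ q.2) && decide (q.2 < 5)
        && (cellI rel q.1 q.2 == v) then PySem.Set.add s q else s) = s) := by
  by_cases hg : (decide (0 ≤ q.1) && decide (q.1 < 5) && decide (0 ≤ q.2) && decide (q.2 < 5)
      && (cellI rel q.1 q.2 == v)) = true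
  · rw [if_pos hg, PySem.Set.add_eq_ite]
    by_cases hm : q ∈ s
    · rw [if_pos hm]; exact ⟨le_refl _, fun _ => rfl⟩
    · rw [if_neg hm]
      constructor
      · simp
      · intro h; simp at h
  · rw [if_neg (by simpa using hg)]
    exact ⟨le_refl _, fun _ => rfl⟩

lemma satStep_grow (rel : List (List Int)) (v : Int) (S : PySem.Set (Int × Int)) :
    S.length ≤ (satStep rel v S).length ∧
    ((satStep rel v S).length = S.length → satStep rel v S = S) := by
  refine foldl_grow _ (fun s p => foldl_grow _ (fun s' q => addIf_grow rel v s' q) (pvNbrs p) s) S S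

lemma satStep_mem (rel : List (List Int)) (v : Int) (S : PySem.Set (Int × Int)) :
    ∀ q, q ∈ satStep rel v S ↔ q ∈ S ∨ ∃ p ∈ S, (pvAdj p q = true ∧ Ec rel v q = true) := by
  have main : ∀ (L : List (Int × Int)) (acc : PySem.Set (Int × Int)) (q : Int × Int),
      q ∈ L.foldl (fun acc (p : Int × Int) =>
        (pvNbrs p).foldl
          (fun acc2 q =>
            if decide (0 ≤ q.1) && decide (q.1 < 5) && decide (0 ≤ q.2) && decide (q.2 < 5)
                && (cellI rel q.1 q.2 == v) then
              PySem.Set.add acc2 q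
            else acc2) acc) acc
        ↔ q ∈ acc ∨ ∃ p ∈ L, (pvAdj p q = true ∧ Ec rel v q = true) := by
    intro L
    induction L with
    | nil => simp
    | cons a L ih =>
      intro acc q
      rw [List.foldl_cons, ih, inner_mem, mem_nbrs]
      constructor
      · rintro ((h | h) | ⟨p, hp, hh⟩)
        · exact Or.inl h
        · exact Or.inr ⟨a, List.mem_cons_self, h⟩
        · exact Or.inr ⟨p, List.mem_cons_of_mem _ hp, hh⟩
      · rintro (h | ⟨p, hp, hh⟩)
        · exact Or.inl (Or.inl h)
        · rcases List.mem_cons.1 hp with rfl | hp'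
          · exact Or.inl (Or.inr hh)
          · exact Or.inr ⟨p, hp', hh⟩
  intro q
  exact main S S q

lemma satStep_nodup (rel : List (List Int)) (v : Int) (S : PySem.Set (Int × Int))
    (h : S.Nodup) : (satStep rel v S).Nodup := by
  have main : ∀ (L : List (Int × Int)) (acc : PySem.Set (Int × Int)), acc.Nodup →
      (L.foldl (fun acc (p : Int × Int) =>
        (pvNbrs p).foldl
          (fun acc2 q =>
            if decide (0 ≤ q.1) && decide (q.1 < 5) && decide (0 ≤ q.2) && decide (q.2 < 5)
                && (cellI rel q.1 q.2 == v) then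
              PySem.Set.add acc2 q
            else acc2) acc) acc).Nodup := by
    intro L
    induction L with
    | nil => intro acc h'; exact h'
    | cons a L ih =>
      intro acc h'
      rw [List.foldl_cons]
      exact ih _ (inner_nodup rel v _ _ h')
  exact main S S h


lemma foldl_const {α σ : Type} (h : σ → σ) :
    ∀ (l : List α) (s : σ), l.foldl (fun s _ => h s) s = h^[l.length] s := by
  intro l
  induction l with
  | nil => intro s; rfl
  | cons a l ih =>
    intro s
    rw [List.foldl_cons, ih, List.length_cons, ← Function.iterate_succ_apply]

lemma len_le_25 (S : List (Int × Int)) (hnd : S.Nodup) (hin : ∀ q ∈ S, pvInB q = true) :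
    S.length ≤ 25 := by
  have h1 : S.toFinset.card = S.length := List.toFinset_card_of_nodup hnd
  have h2 : S.toFinset ⊆ allF := fun q hq => (mem_allF q).2 (hin q (List.mem_toFinset.1 hq))
  have h3 := Finset.card_le_card h2
  rw [card_allF] at h3
  omega

lemma comp_cells_spec (rel : List (List Int)) (c : Int × Int) (hc : pvInB c = true) :
    (comp_cells rel c.1 c.2).length
      = Set.ncard {q | reach0 (fun p => cellI rel p.1 p.2) (cellI rel c.1 c.2) c q} := by
  set g0 : (Int × Int) → Int := fun p => cellI rel p.1 p.2 with hg0
  set v : Int := cellI rel c.1 c.2 with hv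
  have hiter : comp_cells rel c.1 c.2 = (satStep rel v)^[25] [c] := by
    have h1 : comp_cells rel c.1 c.2
        = (PySem.List.pyRange 0 25 1).foldl (fun s _ => satStep rel v s) (PySem.Set.ofList [c]) := rfl
    rw [h1, foldl_const]
    have h2 : (PySem.List.pyRange 0 25 1).length = 25 := by decide
    have h3 : PySem.Set.ofList [c] = [c] := rfl
    rw [h2, h3]
  have hInv : ∀ k : Nat, ((satStep rel v)^[k] [c]).Nodup ∧ c ∈ (satStep rel v)^[k] [c] ∧
      (∀ q ∈ (satStep rel v)^[k] [c], q = c ∨ Ec rel v q = true) ∧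
      (∀ q ∈ (satStep rel v)^[k] [c], reach0 g0 v c q) := by
    intro k
    induction k with
    | zero =>
      simp only [Function.iterate_zero_apply]
      refine ⟨List.nodup_singleton c, List.mem_singleton_self c, ?_, ?_⟩
      · intro q hq; rw [List.mem_singleton] at hq; exact Or.inl hq
      · intro q hq; rw [List.mem_singleton] at hq; subst hq; exact Relation.ReflTransGen.refl
    | succ k ih =>
      obtain ⟨ih1, ih2, ih3, ih4⟩ := ih
      rw [Function.iterate_succ_apply']
      refine ⟨satStep_nodup rel v _ ih1, (satStep_mem rel v _ c).2 (Or.inl ih2), ?_, ?_⟩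
      · intro q hq
        rcases (satStep_mem rel v _ q).1 hq with h | ⟨p, _, _, hE⟩
        · exact ih3 q h
        · exact Or.inr hE
      · intro q hq
        rcases (satStep_mem rel v _ q).1 hq with h | ⟨p, hp, hadj, hE⟩
        · exact ih4 q h
        · obtain ⟨hinb, hval⟩ := (Ec_iff rel v q).1 hE
          exact (ih4 p hp).tail ⟨hadj, hinb, hval⟩
  have hbound : ∀ k : Nat, ((satStep rel v)^[k] [c]).length ≤ 25 := by
    intro k
    obtain ⟨h1, _, h3, _⟩ := hInv k
    refine len_le_25 _ h1 ?_
    intro q hq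
    rcases h3 q hq with rfl | hE
    · exact hc
    · exact ((Ec_iff rel v q).1 hE).1
  have hfix : ∃ k : Nat, k < 25 ∧ satStep rel v ((satStep rel v)^[k] [c]) = (satStep rel v)^[k] [c] := by
    by_contra hcon
    rw [not_exists] at hcon
    simp only [not_and] at hcon
    have hgrow : ∀ n : Nat, n ≤ 25 → n + 1 ≤ ((satStep rel v)^[n] [c]).length := by
      intro n
      induction n with
      | zero => intro _; simp
      | succ n ihn =>
        intro hn
        have h1 := ihn (by omega)
        have hne := hcon n (by omega)
        obtain ⟨hle, heq⟩ := satStep_grow rel v ((satStep rel v)^[n] [c])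
        rw [Function.iterate_succ_apply']
        by_cases he : (satStep rel v ((satStep rel v)^[n] [c])).length = ((satStep rel v)^[n] [c]).length
        · exact absurd (heq he) hne
        · have := hle
          omega
    have h26 := hgrow 25 (le_refl _)
    have h25 := hbound 25
    omega
  obtain ⟨k, hk25, hfixk⟩ := hfix
  have hT25 : (satStep rel v)^[25] [c] = (satStep rel v)^[k] [c] := by
    have h1 : (25 : Nat) = (25 - k) + k := by omega
    rw [h1, Function.iterate_add_apply, Function.iterate_fixed hfixk]
  have hclosed : ∀ q ∈ (satStep rel v)^[25] [c], ∀ r', pvAdj q r' = true → Ec rel v r' = true →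
      r' ∈ (satStep rel v)^[25] [c] := by
    intro q hq r' hadj hE
    have h1 : r' ∈ satStep rel v ((satStep rel v)^[25] [c]) := (satStep_mem rel v _ r').2 (Or.inr ⟨q, hq, hadj, hE⟩)
    rw [hT25, hfixk] at h1
    rw [hT25]
    exact h1
  have hcomplete : ∀ q, reach0 g0 v c q → q ∈ (satStep rel v)^[25] [c] := by
    intro q hq
    induction hq with
    | refl => exact (hInv 25).2.1
    | tail h1 h2 ih =>
      refine hclosed _ ih _ h2.1 ?_
      exact (Ec_iff rel v _).2 ⟨h2.2.1, h2.2.2⟩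
  have hchar : ∀ q, q ∈ (satStep rel v)^[25] [c] ↔ reach0 g0 v c q := by
    intro q
    exact ⟨fun h => (hInv 25).2.2.2 q h, hcomplete q⟩
  have hset : ↑((satStep rel v)^[25] [c]).toFinset = {q | reach0 g0 v c q} := by
    ext q
    simp only [List.coe_toFinset, Set.mem_setOf_eq]
    exact hchar q
  rw [hiter, ← hset, Set.ncard_coe_finset]
  exact (List.toFinset_card_of_nodup (hInv 25).1).symm


-- ----- the main loop of A, related to the component structure of the original grid -----
def vis0 : List (List Bool) :=
  (PySem.List.pyRange 0 5 1).map (fun _ => (PySem.List.pyRange 0 5 1).map (fun _ => false))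

def bodyA (st : List (List Bool) × List (List Int) × Int) (p : Int × Int) :
    List (List Bool) × List (List Int) × Int :=
  gain_body st p.1 p.2

lemma pyRange5 : PySem.List.pyRange 0 5 1 = [0, 1, 2, 3, 4] := by decide

lemma foldl_5x5 {σ : Type} (f : σ → Int → Int → σ) (s : σ) :
    (PySem.List.pyRange 0 5 1).foldl
      (fun st y => (PySem.List.pyRange 0 5 1).foldl (fun st x => f st y x) st) s
    = allList.foldl (fun st p => f st p.1 p.2) s := by
  rw [pyRange5]
  simp [allList, List.foldl]

lemma gain_once_eq (relics : List (List Int)) :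
    gain_once relics = (allList.foldl bodyA (vis0, relics, 0)).2.2 := by
  unfold gain_once
  rw [foldl_5x5 gain_body]
  have h1 : ((PySem.List.pyRange 0 5 1).map
      (fun _ => (PySem.List.pyRange 0 5 1).map (fun _ => false))) = vis0 := rfl
  have h2 : (fun (st : List (List Bool) × List (List Int) × Int) (p : Int × Int) =>
      gain_body st p.1 p.2) = bodyA := rfl
  rw [h1, h2]

lemma gain_once_alt_eq (relics : List (List Int)) :
    gain_once_alt relics = allList.foldl (fun t p => alt_body relics t p.1 p.2) 0 := by
  unfold gain_once_alt
  rw [foldl_5x5 (alt_body relics)]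

lemma count_fold (pred : (Int × Int) → Bool) :
    ∀ (l : List (Int × Int)) (F : Finset (Int × Int)) (t : Int),
    l.Nodup → (∀ p ∈ F, p ∈ l) → (∀ p ∈ l, (pred p = true ↔ p ∈ F)) →
    l.foldl (fun t p => if pred p then t + 1 else t) t = t + (F.card : Int) := by
  intro l
  induction l with
  | nil =>
    intro F t _ hsub _
    have hF : F = ∅ := Finset.eq_empty_iff_forall_notMem.2 (fun p hp => by simpa using hsub p hp)
    simp [hF]
  | cons a l ih =>
    intro F t hnd hsub hiff
    rw [List.foldl_cons]
    by_cases hp : pred a = true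
    · have haF : a ∈ F := (hiff a List.mem_cons_self).1 hp
      rw [if_pos hp]
      have hrec := ih (F.erase a) (t + 1) hnd.of_cons
        (fun p hpF => by
          have h1 := Finset.mem_of_mem_erase hpF
          have h2 := Finset.ne_of_mem_erase hpF
          rcases List.mem_cons.1 (hsub p h1) with rfl | h3
          · exact absurd rfl h2
          · exact h3)
        (fun p hpl => by
          rw [Finset.mem_erase]
          constructor
          · intro hpp
            refine ⟨?_, (hiff p (List.mem_cons_of_mem _ hpl)).1 hpp⟩
            rintro rfl
            exact (List.nodup_cons.1 hnd).1 hpl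
          · intro hpp
            exact (hiff p (List.mem_cons_of_mem _ hpl)).2 hpp.2)
      rw [hrec, Finset.card_erase_of_mem haF]
      have hpos : 0 < F.card := Finset.card_pos.2 ⟨a, haF⟩
      push_cast [Nat.cast_sub (by omega : 1 ≤ F.card)]
      ring
    · rw [if_neg hp]
      refine ih F t hnd.of_cons
        (fun p hpF => by
          rcases List.mem_cons.1 (hsub p hpF) with rfl | h3
          · exact absurd ((hiff p List.mem_cons_self).2 hpF) hp
          · exact h3)
        (fun p hpl => hiff p (List.mem_cons_of_mem _ hpl))

lemma comp_set_eq {g0 : (Int × Int) → Int} {c d : Int × Int}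
    (hc : pvInB c = true) (hcd : reach0 g0 (g0 c) c d) :
    {x | reach0 g0 (g0 d) d x} = {x | reach0 g0 (g0 c) c x} := by
  have hvd : g0 d = g0 c := by
    rcases reach0_val hcd with rfl | hh
    · rfl
    · exact hh.2
  rw [hvd]
  ext x
  simp only [Set.mem_setOf_eq]
  constructor
  · intro h; exact hcd.trans h
  · intro h; exact (reach0_symm hc rfl hcd).trans h

lemma loop_go (g0 : (Int × Int) → Int) :
    ∀ (todo : List (Int × Int)) (st : List (List Bool) × List (List Int) × Int)
      (V Z : Finset (Int × Int)),
    (∀ p ∈ todo, pvInB p = true) →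
    Shape5 st.1 → VisCorr st.1 V → Shape5 st.2.1 → RelCorr st.2.1 Z g0 →
    (∀ d ∈ V, pvInB d = true ∧ g0 d ≠ 0 ∧ ∀ x, reach0 g0 (g0 d) d x → x ∈ V) →
    (∀ d, d ∈ Z ↔ d ∈ V ∧ BigC g0 d) →
    st.2.2 = (Z.card : Int) →
    ∃ V' Z' : Finset (Int × Int),
      (∀ d ∈ V', pvInB d = true ∧ g0 d ≠ 0 ∧ ∀ x, reach0 g0 (g0 d) d x → x ∈ V') ∧
      (∀ d, d ∈ Z' ↔ d ∈ V' ∧ BigC g0 d) ∧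
      (todo.foldl bodyA st).2.2 = (Z'.card : Int) ∧
      V ⊆ V' ∧
      (∀ p ∈ todo, g0 p ≠ 0 → p ∈ V') := by
  intro todo
  induction todo with
  | nil =>
    intro st V Z _ _ _ _ _ hV hZ hs
    exact ⟨V, Z, hV, hZ, hs, Finset.Subset.refl _, by simp⟩
  | cons c todo ih =>
    intro st V Z hinb h5v hvc h5r hrc hV hZ hs
    have hc : pvInB c = true := hinb c List.mem_cons_self
    have hZV : Z ⊆ V := fun d hd => ((hZ d).1 hd).1
    have hVallF : V ⊆ allF := fun d hd => (mem_allF d).2 (hV d hd).1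
    rw [List.foldl_cons]
    by_cases hcV : c ∈ V
    · -- already visited: skipped
      have hcb : cellB st.1 c.1 c.2 = true := (hvc c hc).2 hcV
      have hb : bodyA st c = st := by
        simp only [bodyA, gain_body, hcb, Bool.true_or, if_true]
      rw [hb]
      obtain ⟨V', Z', m1, m2, m3, m4, m5⟩ :=
        ih st V Z (fun p hp => hinb p (List.mem_cons_of_mem _ hp)) h5v hvc h5r hrc hV hZ hs
      exact ⟨V', Z', m1, m2, m3, m4, fun p hp hg => by
        rcases List.mem_cons.1 hp with rfl | hp'
        · exact m4 hcV
        · exact m5 p hp' hg⟩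
    · have hcb : cellB st.1 c.1 c.2 = false := by
        rw [← Bool.not_eq_true]
        intro hx; exact hcV ((hvc c hc).1 hx)
      have hcZ : c ∉ Z := fun hx => hcV (hZV hx)
      have hcell : cellI st.2.1 c.1 c.2 = g0 c := by
        rw [hrc c hc, if_neg hcZ]
      by_cases hg0 : g0 c = 0
      · -- zero cell: skipped
        have hb : bodyA st c = st := by
          have : (cellI st.2.1 c.1 c.2 == 0) = true := by
            rw [hcell, hg0]; rfl
          simp only [bodyA, gain_body, hcb, this, Bool.or_true, if_true]
        rw [hb]
        obtain ⟨V', Z', m1, m2, m3, m4, m5⟩ :=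
          ih st V Z (fun p hp => hinb p (List.mem_cons_of_mem _ hp)) h5v hvc h5r hrc hV hZ hs
        exact ⟨V', Z', m1, m2, m3, m4, fun p hp hg => by
          rcases List.mem_cons.1 hp with rfl | hp'
          · exact absurd hg0 hg
          · exact m5 p hp' hg⟩
      · -- fresh nonzero cell
        have hcond : (cellB st.1 c.1 c.2 || (cellI st.2.1 c.1 c.2 == 0)) = false := by
          rw [hcb, hcell]
          simpa using hg0
        -- the count call and its abstract twin
        obtain ⟨e1, e2, e3⟩ := corr_count st.2.1 (g0 c) 25 c st.1 V h5v hvc hc hcell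
        have hcallF : c ∈ allF := (mem_allF c).2 hc
        have hfuel : (allF \ V).card ≤ 25 := by
          have := Finset.card_le_card (Finset.sdiff_subset (s := allF) (t := V))
          rw [card_allF] at this; omega
        obtain ⟨w1, w2, w3, w4, w5⟩ :=
          countT_spec (Ec st.2.1 (g0 c)) (fun b hb => by simp only [Ec, Bool.and_eq_true] at hb; exact hb.1)
            25 c V hc hcV hVallF hfuel
        -- reach over the mutated grid = components of g0
        have H1 : ∀ x, reach0 g0 (g0 c) c x → x ∉ V := by
          intro x hx hxV
          rcases reach0_val hx with rfl | ⟨hxb, hxv⟩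
          · exact hcV hxV
          · obtain ⟨_, _, hxcl⟩ := hV x hxV
            have hsym : reach0 g0 (g0 c) x c := reach0_symm hc rfl hx
            rw [← hxv] at hsym
            exact hcV (hxcl c hsym)
        have H2 : ∀ x, x ∉ V → (Ec st.2.1 (g0 c) x = true ↔ (pvInB x = true ∧ g0 x = g0 c)) := by
          intro x hxV
          rw [Ec_iff]
          constructor
          · rintro ⟨hb, hcl⟩
            refine ⟨hb, ?_⟩
            rw [hrc x hb, if_neg (fun hx => hxV (hZV hx))] at hcl
            exact hcl
          · rintro ⟨hb, hval⟩
            refine ⟨hb, ?_⟩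
            rw [hrc x hb, if_neg (fun hx => hxV (hZV hx))]
            exact hval
        have hWchar : ∀ d, d ∈ (countT (Ec st.2.1 (g0 c)) 25 c V).2
            ↔ d ∈ V ∨ reach0 g0 (g0 c) c d := by
          intro d
          rw [w4 d, reachE_iff_reach0 H1 H2 d]
        have hWVset : ↑((countT (Ec st.2.1 (g0 c)) 25 c V).2 \ V)
            = {x | reach0 g0 (g0 c) c x} := by
          ext d
          simp only [Finset.coe_sdiff, Set.mem_diff, Finset.mem_coe, Set.mem_setOf_eq]
          constructor
          · rintro ⟨hd, hdV⟩
            rcases (hWchar d).1 hd with h | h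
            · exact absurd h hdV
            · exact h
          · intro h
            exact ⟨(hWchar d).2 (Or.inr h), H1 d h⟩
        have hkcard : (countT (Ec st.2.1 (g0 c)) 25 c V).1
            = (Set.ncard {x | reach0 g0 (g0 c) c x} : Int) := by
          rw [w5, ← hWVset, Set.ncard_coe_finset]
          have h2 := Finset.card_sdiff_add_card_eq_card w1
          omega
        -- the new visited set W
        have hVsubW : V ⊆ (countT (Ec st.2.1 (g0 c)) 25 c V).2 := w1
        have hWcl : ∀ d ∈ (countT (Ec st.2.1 (g0 c)) 25 c V).2,
            pvInB d = true ∧ g0 d ≠ 0 ∧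
            ∀ x, reach0 g0 (g0 d) d x → x ∈ (countT (Ec st.2.1 (g0 c)) 25 c V).2 := by
          intro d hd
          rcases (hWchar d).1 hd with h | h
          · obtain ⟨p1, p2, p3⟩ := hV d h
            exact ⟨p1, p2, fun x hx => hVsubW (p3 x hx)⟩
          · have hvd : g0 d = g0 c := by
              rcases reach0_val h with rfl | hh
              · rfl
              · exact hh.2
            have hdb : pvInB d = true := by
              rcases reach0_val h with rfl | hh
              · exact hc
              · exact hh.1
            refine ⟨hdb, by rw [hvd]; exact hg0, ?_⟩
            intro x hx
            rw [hvd] at hx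
            exact (hWchar x).2 (Or.inr (h.trans hx))
        have hBigIff : ∀ d, reach0 g0 (g0 c) c d → (BigC g0 d ↔ BigC g0 c) := by
          intro d hd
          unfold BigC
          rw [comp_set_eq hc hd]
        have hcW : c ∈ (countT (Ec st.2.1 (g0 c)) 25 c V).2 := w2
        by_cases hbig : (3:Int) ≤ (count_relic 25 c.1 c.2 st.2.1 st.1).1
        · -- big component: count, then remove
          have hb : bodyA st c = ((count_relic 25 c.1 c.2 st.2.1 st.1).2,
              remove_relic 25 c.1 c.2 (cellI st.2.1 c.1 c.2) st.2.1,
              st.2.2 + (count_relic 25 c.1 c.2 st.2.1 st.1).1) := by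
            simp only [bodyA, gain_body, hcond, Bool.false_eq_true, if_false, hbig, if_true]
          rw [hb]
          have hBigc : BigC g0 c := by
            rw [e1, hkcard] at hbig
            unfold BigC
            exact_mod_cast hbig
          -- the removal and its abstract twin
          rw [hcell]
          obtain ⟨f1, f2⟩ := corr_remove g0 (g0 c) hg0 25 c st.2.1 Z h5r hrc hc
          have hZallF : Z ⊆ allF := hZV.trans hVallF
          have hfuelZ : (allF \ Z).card ≤ 25 := by
            have := Finset.card_le_card (Finset.sdiff_subset (s := allF) (t := Z))
            rw [card_allF] at this; omega
          obtain ⟨z1, z2, z3, z4, z5⟩ :=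
            countT_spec (Er g0 (g0 c)) (fun b hb => by simp only [Er, Bool.and_eq_true] at hb; exact hb.1)
              25 c Z hc hcZ hZallF hfuelZ
          have H1' : ∀ x, reach0 g0 (g0 c) c x → x ∉ Z := fun x hx hxZ => H1 x hx (hZV hxZ)
          have H2' : ∀ x, x ∉ Z → (Er g0 (g0 c) x = true ↔ (pvInB x = true ∧ g0 x = g0 c)) := by
            intro x _
            simp [Er]
          have hZchar : ∀ d, d ∈ (countT (Er g0 (g0 c)) 25 c Z).2
              ↔ d ∈ Z ∨ reach0 g0 (g0 c) c d := by
            intro d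
            rw [z4 d, reachE_iff_reach0 H1' H2' d]
          have hZZ'set : ↑((countT (Er g0 (g0 c)) 25 c Z).2 \ Z)
              = {x | reach0 g0 (g0 c) c x} := by
            ext d
            simp only [Finset.coe_sdiff, Set.mem_diff, Finset.mem_coe, Set.mem_setOf_eq]
            constructor
            · rintro ⟨hd, hdZ⟩
              rcases (hZchar d).1 hd with h | h
              · exact absurd h hdZ
              · exact h
            · intro h
              exact ⟨(hZchar d).2 (Or.inr h), H1' d h⟩
          refine ih ((count_relic 25 c.1 c.2 st.2.1 st.1).2,
              remove_relic 25 c.1 c.2 (g0 c) st.2.1,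
              st.2.2 + (count_relic 25 c.1 c.2 st.2.1 st.1).1)
            (countT (Ec st.2.1 (g0 c)) 25 c V).2
            (countT (Er g0 (g0 c)) 25 c Z).2
            (fun p hp => hinb p (List.mem_cons_of_mem _ hp)) e2 e3 f1 f2 hWcl ?_ ?_
            |>.imp (fun V' h => h.imp (fun Z' hh =>
              ⟨hh.1, hh.2.1, hh.2.2.1, hVsubW.trans hh.2.2.2.1, fun p hp hgp => by
                rcases List.mem_cons.1 hp with rfl | hp'
                · exact hh.2.2.2.1 hcW
                · exact hh.2.2.2.2 p hp' hgp⟩))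
          · -- Z' characterization
            intro d
            rw [hZchar d, hWchar d]
            constructor
            · rintro (hd | hd)
              · obtain ⟨hdV, hdB⟩ := (hZ d).1 hd
                exact ⟨Or.inl hdV, hdB⟩
              · exact ⟨Or.inr hd, (hBigIff d hd).2 hBigc⟩
            · rintro ⟨hd | hd, hdB⟩
              · exact Or.inl ((hZ d).2 ⟨hd, hdB⟩)
              · exact Or.inr hd
          · -- the running sum
            dsimp only
            rw [hs, e1, hkcard]
            have hcount : ((countT (Er g0 (g0 c)) 25 c Z).2.card : Int)
                = (Z.card : Int) + (Set.ncard {x | reach0 g0 (g0 c) c x} : Int) := by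
              have h1 : ((countT (Er g0 (g0 c)) 25 c Z).2 \ Z).card
                  = Set.ncard {x | reach0 g0 (g0 c) c x} := by
                rw [← hZZ'set, Set.ncard_coe_finset]
              have h2 := Finset.card_sdiff_add_card_eq_card z1
              omega
            omega
        · -- small component: count only
          have hb : bodyA st c = ((count_relic 25 c.1 c.2 st.2.1 st.1).2, st.2.1, st.2.2) := by
            simp only [bodyA, gain_body, hcond, Bool.false_eq_true, if_false, hbig]
          rw [hb]
          have hnBigc : ¬ BigC g0 c := by
            intro hx
            apply hbig
            rw [e1, hkcard]
            unfold BigC at hx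
            exact_mod_cast hx
          refine ih ((count_relic 25 c.1 c.2 st.2.1 st.1).2, st.2.1, st.2.2)
            (countT (Ec st.2.1 (g0 c)) 25 c V).2 Z
            (fun p hp => hinb p (List.mem_cons_of_mem _ hp)) e2 e3 h5r ?_ hWcl ?_ hs
            |>.imp (fun V' h => h.imp (fun Z' hh =>
              ⟨hh.1, hh.2.1, hh.2.2.1, hVsubW.trans hh.2.2.2.1, fun p hp hgp => by
                rcases List.mem_cons.1 hp with rfl | hp'
                · exact hh.2.2.2.1 hcW
                · exact hh.2.2.2.2 p hp' hgp⟩))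
          · -- RelCorr is unchanged, but stated against the same Z
            exact hrc
          · -- Z characterization against the enlarged visited set
            intro d
            rw [hWchar d]
            constructor
            · intro hd
              obtain ⟨hdV, hdB⟩ := (hZ d).1 hd
              exact ⟨Or.inl hdV, hdB⟩
            · rintro ⟨hd | hd, hdB⟩
              · exact (hZ d).2 ⟨hd, hdB⟩
              · exact absurd ((hBigIff d hd).1 hdB) hnBigc

-- ===== VERDICT (by name: the statement is the Claim_ definition above) =====
theorem gain_once_spec : Claim_equal_gain_once := by
  unfold Claim_equal_gain_once
  intro relics _ hpre
  unfold Spec_gain_once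
  have h5r : Shape5 relics := ⟨hpre.1, hpre.2⟩
  have hvis_false : ∀ p : Int × Int, pvInB p = true → cellB vis0 p.1 p.2 = false := by
    intro p hp
    have hmem := (mem_allList p).2 hp
    fin_cases hmem <;> decide
  obtain ⟨V', Z', hVcl, hZch, hsum, _, hcov⟩ :=
    loop_go (fun p => cellI relics p.1 p.2) allList (vis0, relics, 0) ∅ ∅
      (fun p hp => (mem_allList p).1 hp)
      (show Shape5 vis0 from ⟨by decide, by decide⟩)
      (fun p hp => by simp [hvis_false p hp])
      h5r
      (fun p hp => by simp)
      (by simp)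
      (by simp)
      (by simp)
  have hVchar : ∀ d, d ∈ V' ↔ (pvInB d = true ∧ cellI relics d.1 d.2 ≠ 0) := by
    intro d
    constructor
    · intro hd
      exact ⟨(hVcl d hd).1, (hVcl d hd).2.1⟩
    · rintro ⟨hb, hnz⟩
      exact hcov d ((mem_allList d).2 hb) hnz
  have hsub : ∀ p ∈ Z', p ∈ allList := by
    intro p hp
    exact (mem_allList p).2 (hVcl p ((hZch p).1 hp).1).1
  have hiff : ∀ p ∈ allList,
      (((cellI relics p.1 p.2 != 0)
        && decide ((3:Int) ≤ PySem.List.len (comp_cells relics p.1 p.2))) = true ↔ p ∈ Z') := by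
    intro p hpl
    have hpb : pvInB p = true := (mem_allList p).1 hpl
    have hlen := comp_cells_spec relics p hpb
    rw [hZch p, hVchar p]
    simp only [Bool.and_eq_true, bne_iff_ne, ne_eq, decide_eq_true_eq, PySem.List.len_eq, hlen]
    constructor
    · rintro ⟨hnz, hbig⟩
      refine ⟨⟨hpb, hnz⟩, ?_⟩
      unfold BigC
      exact_mod_cast hbig
    · rintro ⟨⟨_, hnz⟩, hbig⟩
      refine ⟨hnz, ?_⟩
      unfold BigC at hbig
      exact_mod_cast hbig
  rw [gain_once_eq, hsum, gain_once_alt_eq]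
  rw [show (fun (t : Int) (p : Int × Int) => alt_body relics t p.1 p.2)
      = (fun (t : Int) (p : Int × Int) =>
          if ((cellI relics p.1 p.2 != 0)
            && decide ((3:Int) ≤ PySem.List.len (comp_cells relics p.1 p.2))) then t + 1 else t)
      from rfl]
  rw [count_fold _ allList Z' 0 nodup_allList hsub hiff]
  ring
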